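-- pv_equiv track=rewrite | github.com/StevenRud7/Natural-Language-Processing-I | N-gram Models and Probabilities/hw1.py | count_trigrams
-- ===== SOURCE A (Python) =====
-- from collections import Counter, defaultdict
-- from typing import Iterable, TypeVar, Sequence
--
-- START_TOKEN = "<start>"
--
-- END_TOKEN = "<end>"
--
-- def trigrams(sentence: Sequence[str]) -> list[tuple[str, str, str]]:
--     """Return the trigrams contained in a sequence."""
--     l =[]
--     l.append((START_TOKEN,START_TOKEN, sentence[0]))
--     if len(sentence) > 1:
--         l.append((START_TOKEN,sentence[0], sentence[1]))
--         for x in range(len(sentence)-2):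
--             l.append((sentence[x],sentence[x+1],sentence[x+2]))
--         l.append((sentence[len(sentence)-2],sentence[len(sentence)-1],END_TOKEN))
--     else:
--         l.append((START_TOKEN,sentence[0],END_TOKEN))
--     l.append((sentence[len(sentence)-1],END_TOKEN,END_TOKEN))
--     return l
--
-- def count_trigrams(
--     sentences: Iterable[list[str]], lower: bool = False
-- ) -> Counter[tuple[str, str, str]]:
--     """Count the trigrams in an iterable of sentences, optionally lowercasing."""
--     c = Counter()
--     count = 0
--     for x in sentences:
--         if lower == True:
--             for y in x:
--                 x[count] = x[count].lower()
--                 count+=1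
--             count=0
--         x = trigrams(x)
--         c.update(x)
--     return c
-- ===== SOURCE B (Python) =====
-- from collections import Counter
--
-- START_TOKEN = "<start>"
-- END_TOKEN = "<end>"
--
--
-- def count_trigrams(sentences, lower=False):
--     """Count trigrams via a padded sliding window instead of index arithmetic."""
--     c = Counter()
--     for x in sentences:
--         if lower == True:
--             x[:] = [w.lower() for w in x]
--         padded = [START_TOKEN, START_TOKEN] + x + [END_TOKEN, END_TOKEN]
--         c.update(zip(padded, padded[1:], padded[2:]))
--     return c
-- ===== Notes on version B (the rewrite author's own statement) =====
-- stated objective: idiomatic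
-- what changed: B replaces the four-case index arithmetic of the trigrams helper by padding each sentence with two start/end tokens and counting every length-3 sliding window (zip of the padded list with its two shifts), and replaces the manual counter-indexed lowercasing loop with an in-place slice assignment of a comprehension.
import Mathlib
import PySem

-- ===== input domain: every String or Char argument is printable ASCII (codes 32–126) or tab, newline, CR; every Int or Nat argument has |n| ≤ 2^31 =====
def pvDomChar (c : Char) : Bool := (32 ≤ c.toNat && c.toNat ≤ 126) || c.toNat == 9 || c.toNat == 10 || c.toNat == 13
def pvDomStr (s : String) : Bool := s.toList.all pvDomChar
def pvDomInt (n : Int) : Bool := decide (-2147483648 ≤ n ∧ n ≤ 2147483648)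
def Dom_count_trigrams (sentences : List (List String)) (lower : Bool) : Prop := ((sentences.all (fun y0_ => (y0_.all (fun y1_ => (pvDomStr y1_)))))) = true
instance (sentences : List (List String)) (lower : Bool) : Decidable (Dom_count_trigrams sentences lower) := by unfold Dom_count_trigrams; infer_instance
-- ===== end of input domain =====

-- B counts trigrams over a 2-token start/end padded sliding window instead of A's
-- four-case index arithmetic (same cost; 'idiomatic'); both A and B lowercase each
-- sentence list IN PLACE when lower=True (equivalence proved about the return value;
-- the observable mutation is the same).

def pvStart : String := "<start>"
def pvEnd : String := "<end>"

-- ===== PORT A =====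
-- trigrams(sentence): sentence[i] is read only at in-range nonnegative indices on the
-- branches taken for nonempty sentences (the domain Pre_ admits), where List.getD is exact.
def trigramsA (s : List String) : List (String × String × String) :=
  let g : Nat → String := fun i => s.getD i ""
  let l : List (String × String × String) := [(pvStart, pvStart, g 0)]
  let l :=
    if s.length > 1 then
      let l := l ++ [(pvStart, g 0, g 1)]
      -- for x in range(len(sentence)-2): l.append((sentence[x], sentence[x+1], sentence[x+2]))
      let l := (List.range (s.length - 2)).foldl
        (fun acc x => acc ++ [(g x, g (x + 1), g (x + 2))]) l
      l ++ [(g (s.length - 2), g (s.length - 1), pvEnd)]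
    else l ++ [(pvStart, g 0, pvEnd)]
  l ++ [(g (s.length - 1), pvEnd, pvEnd)]

-- for y in x: x[count] = x[count].lower(); count += 1   (length is unchanged, so the
-- live iteration over the mutating list makes exactly len(x) steps)
def lowerA (x : List String) : List String :=
  (x.foldl (fun st _ => (st.1.set st.2 (PySem.Str.lower (st.1.getD st.2 "")), st.2 + 1))
    (x, 0)).1

def count_trigrams (sentences : List (List String)) (lower : Bool) : List (String × String × String × Int) :=
  let c := sentences.foldl (fun c x =>
      let x := if lower then lowerA x else x
      -- c.update(trigrams(x)): Counter increments c[t] = c.get(t, 0) + 1 per element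
      (trigramsA x).foldl (fun d t => d.modify t 0 (· + 1)) c)
    (PySem.Dict.empty)
  c.items.map (fun p => (p.1.1, p.1.2.1, p.1.2.2, p.2))

-- ===== PORT B =====
-- zip(padded, padded[1:], padded[2:])
def win3 (l : List String) : List (String × String × String) :=
  (l.zip ((l.drop 1).zip (l.drop 2))).map (fun p => (p.1, p.2.1, p.2.2))

def count_trigrams_alt (sentences : List (List String)) (lower : Bool) : List (String × String × String × Int) :=
  let c := sentences.foldl (fun c x =>
      -- x[:] = [w.lower() for w in x]
      let x := if lower then x.map PySem.Str.lower else x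
      let padded := [pvStart, pvStart] ++ x ++ [pvEnd, pvEnd]
      (win3 padded).foldl (fun d t => d.modify t 0 (· + 1)) c)
    (PySem.Dict.empty)
  c.items.map (fun p => (p.1.1, p.1.2.1, p.1.2.2, p.2))

-- ===== PRECONDITION & SPEC =====
-- A raises IndexError (sentence[0]) on any empty sentence; Pre_ excludes exactly those inputs.
def Pre_count_trigrams (sentences : List (List String)) (lower : Bool) : Prop :=
  ∀ x ∈ sentences, x ≠ []
instance (sentences : List (List String)) (lower : Bool) : Decidable (Pre_count_trigrams sentences lower) := by unfold Pre_count_trigrams; infer_instance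

def pvWitness_count_trigrams : List (List String) × Bool := ([["Ab"], ["x", "y", "Z"]], true)

def Spec_count_trigrams (sentences : List (List String)) (lower : Bool) (out : List (String × String × String × Int)) : Prop := out = count_trigrams_alt sentences lower
instance (sentences : List (List String)) (lower : Bool) (out : List (String × String × String × Int)) : Decidable (Spec_count_trigrams sentences lower out) := by unfold Spec_count_trigrams; infer_instance

-- ===== CLAIM (what is proved, stated in full; the proofs are below) =====
def Claim_equal_count_trigrams : Prop := ∀ (sentences : List (List String)) (lower : Bool), Dom_count_trigrams sentences lower → Pre_count_trigrams sentences lower → Spec_count_trigrams sentences lower (count_trigrams sentences lower)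

-- ===== LEMMAS AND PROOFS =====

-- A's in-place indexed lowering loop computes the elementwise lowering.
theorem lowerA_fold_inv (it : List String) (A B : List String) (h : it.length = B.length) :
    (it.foldl (fun st _ => (st.1.set st.2 (PySem.Str.lower (st.1.getD st.2 "")), st.2 + 1))
      (A ++ B, A.length)).1 = A ++ B.map PySem.Str.lower := by
  induction it generalizing A B with
  | nil =>
    cases B with
    | nil => simp
    | cons b B' => simp at h
  | cons y it ih =>
    cases B with
    | nil => simp at h
    | cons b B' =>
      have hget : (A ++ b :: B').getD A.length "" = b := by
        simp [List.getD]
      have hset : (A ++ b :: B').set A.length (PySem.Str.lower b)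
          = (A ++ [PySem.Str.lower b]) ++ B' := by
        rw [List.set_append_right _ _ (Nat.le_refl A.length)]
        simp
      simp only [List.foldl_cons, hget, hset]
      have hlen : A.length + 1 = (A ++ [PySem.Str.lower b]).length := by simp
      rw [hlen, ih _ _ (by simpa using h)]
      simp

theorem lowerA_eq_map (x : List String) : lowerA x = x.map PySem.Str.lower := by
  have := lowerA_fold_inv x [] x rfl
  simpa [lowerA] using this

theorem win3_cons3 (a b c : String) (r : List String) :
    win3 (a :: b :: c :: r) = (a, b, c) :: win3 (b :: c :: r) := by
  simp [win3]

-- interior windows + the two end windows = the windows of the end-padded sentence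
theorem interior_eq_win3 (s : List String) (h : 2 ≤ s.length) :
    (List.range (s.length - 2)).map
        (fun x => (s.getD x "", s.getD (x + 1) "", s.getD (x + 2) ""))
      ++ [(s.getD (s.length - 2) "", s.getD (s.length - 1) "", pvEnd),
          (s.getD (s.length - 1) "", pvEnd, pvEnd)]
    = win3 (s ++ [pvEnd, pvEnd]) := by
  induction s with
  | nil => simp at h
  | cons a s' ih =>
    cases s' with
    | nil => simp at h
    | cons b t =>
      cases t with
      | nil =>
        simp [win3]
      | cons c t' =>
        have ihh := ih (by simp)
        simp only [List.length_cons, List.cons_append] at ihh ⊢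
        have e1 : t'.length + 1 + 1 + 1 - 2 = t'.length + 1 := by omega
        have e2 : t'.length + 1 + 1 + 1 - 1 = t'.length + 1 + 1 := by omega
        have e3 : t'.length + 1 + 1 - 2 = t'.length := by omega
        have e4 : t'.length + 1 + 1 - 1 = t'.length + 1 := by omega
        rw [e1, e2]
        rw [e3, e4] at ihh
        rw [List.range_succ_eq_map, List.map_cons, List.map_map]
        have hshift :
            ((fun x => ((a :: b :: c :: t').getD x "", (a :: b :: c :: t').getD (x + 1) "",
                (a :: b :: c :: t').getD (x + 2) "")) ∘ (fun x => x + 1))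
            = fun x => ((b :: c :: t').getD x "", (b :: c :: t').getD (x + 1) "",
                (b :: c :: t').getD (x + 2) "") := by
          funext x
          have e5 : x + 1 + 2 = (x + 2) + 1 := by omega
          simp [Function.comp, e5, List.getD_cons_succ]
        rw [hshift, win3_cons3, ← ihh]
        simp only [List.getD_cons_succ, List.getD_cons_zero]
        simp

theorem trigramsA_eq_win3 (s : List String) (h : s ≠ []) :
    trigramsA s = win3 ([pvStart, pvStart] ++ s ++ [pvEnd, pvEnd]) := by
  cases s with
  | nil => exact absurd rfl h
  | cons a s' =>
    cases s' with
    | nil =>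
      simp [trigramsA, win3]
    | cons b t =>
      have hgt : (a :: b :: t).length > 1 := by simp
      simp only [trigramsA, if_pos hgt]
      rw [PySem.List.foldl_append_singleton_eq_map]
      have h2 : 2 ≤ (a :: b :: t).length := by simp
      simp only [List.cons_append, List.nil_append]
      rw [win3_cons3, win3_cons3]
      have hw : a :: b :: (t ++ [pvEnd, pvEnd]) = (a :: b :: t) ++ [pvEnd, pvEnd] := by simp
      rw [hw, ← interior_eq_win3 _ h2]
      simp

-- per-sentence step equality
theorem step_eq (lower : Bool) (c : PySem.Dict (String × String × String) Int)
    (x : List String) (hx : x ≠ []) :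
    (trigramsA (if lower then lowerA x else x)).foldl (fun d t => d.modify t 0 (· + 1)) c
    = (win3 ([pvStart, pvStart] ++ (if lower then x.map PySem.Str.lower else x) ++ [pvEnd, pvEnd])).foldl
        (fun d t => d.modify t 0 (· + 1)) c := by
  have hx' : (if lower then x.map PySem.Str.lower else x) ≠ [] := by
    cases lower <;> simpa using hx
  rw [show (if lower then lowerA x else x) = (if lower then x.map PySem.Str.lower else x) by
        cases lower <;> simp [lowerA_eq_map]]
  rw [trigramsA_eq_win3 _ hx']

theorem fold_congr (lower : Bool) :
    ∀ (xs : List (List String)) (c : PySem.Dict (String × String × String) Int),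
      (∀ x ∈ xs, x ≠ []) →
      xs.foldl (fun c x =>
        (trigramsA (if lower then lowerA x else x)).foldl (fun d t => d.modify t 0 (· + 1)) c) c
      = xs.foldl (fun c x =>
        (win3 ([pvStart, pvStart] ++ (if lower then x.map PySem.Str.lower else x) ++ [pvEnd, pvEnd])).foldl
          (fun d t => d.modify t 0 (· + 1)) c) c := by
  intro xs
  induction xs with
  | nil => intro c _; rfl
  | cons x xs ih =>
    intro c h
    simp only [List.foldl_cons]
    rw [step_eq lower c x (h x (by simp))]
    exact ih _ (fun y hy => h y (by simp [hy]))

-- ===== VERDICT (by name: the statement is the Claim_ definition above) =====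
theorem count_trigrams_spec : Claim_equal_count_trigrams := by
  intro sentences lower _ hpre
  unfold Spec_count_trigrams count_trigrams count_trigrams_alt
  rw [fold_congr lower sentences _ hpre]
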